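-- pv_equiv track=rewrite | github.com/jerzypodwojski/Playfair-cipher | playfair-cipher.py | handle_new_alphabet
-- ===== SOURCE A (Python) =====
-- def handle_new_alphabet(password):
--     eng_alphabet = ["a", "b", "c", "d", "e", "f", "g", "h", "i", "k", "l", "m", "n", "o", "p", "q", "r", "s", "t",
--                     "u", "v", "w", "x", "y", "z"]
--     x = 0
--     new_alphabet = []
--
--     # insert password into array and remove duplicates
--     for i in password:
--         eng_alphabet.insert(x, i)
--         x += 1
--     eng_alphabet = list(dict.fromkeys(eng_alphabet))
--
--     # change array into 2d array
--     for i in range(5):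
--         new_alphabet.append(eng_alphabet[i * 5:i * 5 + 5])
--
--     return new_alphabet
-- ===== SOURCE B (Python) =====
-- def handle_new_alphabet(password):
--     # One fused pass: dedup and 5x5 reshape at once, stopping at 25 letters.
--     eng_alphabet = ["a", "b", "c", "d", "e", "f", "g", "h", "i", "k", "l", "m", "n", "o", "p", "q", "r", "s", "t",
--                     "u", "v", "w", "x", "y", "z"]
--     seen = set()
--     rows = []
--     row = []
--     for ch in list(password) + eng_alphabet:
--         if ch not in seen:
--             seen.add(ch)
--             row = row + [ch]
--             if len(row) == 5:
--                 rows = rows + [row]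
--                 row = []
--                 if len(rows) == 5:
--                     return rows
--     return rows
-- ===== Notes on version B (the rewrite author's own statement) =====
-- stated objective: alternative
-- what changed: Instead of inserting the password into the alphabet list one char at a time, deduping the flat list with dict.fromkeys and then reslicing it into rows in a second loop, B makes a single pass over the chained password+alphabet sequence with a seen-set, filling the 5x5 grid inline and returning as soon as 5 rows are complete. (single pass, no per-char list.insert shifting and no second reshape loop)
import Mathlib
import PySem

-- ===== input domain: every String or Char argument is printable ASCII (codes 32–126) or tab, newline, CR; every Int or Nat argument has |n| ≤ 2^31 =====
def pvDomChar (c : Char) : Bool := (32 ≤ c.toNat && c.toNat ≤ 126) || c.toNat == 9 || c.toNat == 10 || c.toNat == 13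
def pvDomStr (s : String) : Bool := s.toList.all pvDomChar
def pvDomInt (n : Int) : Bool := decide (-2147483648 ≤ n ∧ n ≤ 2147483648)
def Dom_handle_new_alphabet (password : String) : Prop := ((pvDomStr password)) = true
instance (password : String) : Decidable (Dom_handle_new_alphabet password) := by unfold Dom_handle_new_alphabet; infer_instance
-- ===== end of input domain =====

-- B fuses A's dedup-then-reslice into one pass that fills the 5x5 grid inline (objective: alternative decomposition, same result).

-- ===== PORT A =====
-- the 25-letter Playfair alphabet literal shared by both Python versions
def pvAlpha : List String := ["a", "b", "c", "d", "e", "f", "g", "h", "i", "k", "l", "m", "n", "o", "p", "q", "r", "s", "t", "u", "v", "w", "x", "y", "z"]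

def handle_new_alphabet (password : String) : List (List String) :=
  let st := password.toList.foldl
      (fun (st : List String × Int) c => (PySem.List.insert st.1 st.2 (String.ofList [c]), st.2 + 1))
      (pvAlpha, 0)
  let eng := PySem.List.dedup st.1
  (PySem.List.pyRange 0 5 1).foldl
      (fun acc i => acc ++ [PySem.List.slice eng (some (i * 5)) (some (i * 5 + 5))]) []

-- ===== PORT B =====
def pvBLoop : List String → PySem.Set String → List String → List (List String) → List (List String)
  | [], _, _, rows => rows
  | ch :: rest, seen, row, rows =>
    if PySem.Set.contains seen ch then pvBLoop rest seen row rows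
    else
      let seen' := PySem.Set.add seen ch
      let row' := row ++ [ch]
      if row'.length = 5 then
        let rows' := rows ++ [row']
        if rows'.length = 5 then rows'
        else pvBLoop rest seen' [] rows'
      else pvBLoop rest seen' row' rows

def handle_new_alphabet_alt (password : String) : List (List String) :=
  pvBLoop (password.toList.map (fun c => String.ofList [c]) ++ pvAlpha) PySem.Set.empty [] []

-- ===== PRECONDITION & SPEC =====
def Spec_handle_new_alphabet (password : String) (out : List (List String)) : Prop := out = handle_new_alphabet_alt password
instance (password : String) (out : List (List String)) : Decidable (Spec_handle_new_alphabet password out) := by unfold Spec_handle_new_alphabet; infer_instance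

-- ===== CLAIM (what is proved, stated in full; the proofs are below) =====
def Claim_equal_handle_new_alphabet : Prop := ∀ (password : String), Dom_handle_new_alphabet password → Spec_handle_new_alphabet password (handle_new_alphabet password)

-- ===== LEMMAS AND PROOFS =====

-- first-occurrence dedup relative to an already-seen set (proof-side view of both programs)
def pvDD (seen : PySem.Set String) : List String → List String
  | [] => []
  | x :: xs => if PySem.Set.contains seen x then pvDD seen xs else x :: pvDD (PySem.Set.add seen x) xs

-- pvBLoop after removing the duplicate-skipping: consume a duplicate-free stream into rows of 5
def pvG : List String → List String → List (List String) → List (List String)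
  | [], _, rows => rows
  | x :: xs, row, rows =>
    let row' := row ++ [x]
    if row'.length = 5 then
      let rows' := rows ++ [row']
      if rows'.length = 5 then rows' else pvG xs [] rows'
    else pvG xs row' rows

theorem pv_insert_loop (cs : List Char) (pre tail : List String) :
    (cs.foldl (fun (st : List String × Int) c => (PySem.List.insert st.1 st.2 (String.ofList [c]), st.2 + 1))
      (pre ++ tail, (pre.length : Int))).1 = pre ++ cs.map (fun c => String.ofList [c]) ++ tail := by
  induction cs generalizing pre with
  | nil => simp
  | cons c cs ih =>
    simp only [List.foldl_cons, List.map_cons]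
    rw [PySem.List.insert_natCast (pre ++ tail) pre.length (String.ofList [c]) (by simp)]
    rw [List.take_left, List.drop_left]
    have h3 : ((pre.length : Int) + 1) = (((pre ++ [String.ofList [c]]).length : Nat) : Int) := by
      simp
    have h4 : pre ++ String.ofList [c] :: tail = (pre ++ [String.ofList [c]]) ++ tail := by simp
    rw [h3, h4, ih (pre ++ [String.ofList [c]])]
    simp

theorem pv_foldl_add (xs : List String) (seen : PySem.Set String) :
    xs.foldl PySem.Set.add seen = seen ++ pvDD seen xs := by
  induction xs generalizing seen with
  | nil => simp [pvDD]
  | cons x xs ih =>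
    simp only [List.foldl_cons, pvDD]
    by_cases h : PySem.Set.contains seen x
    · rw [if_pos h]
      have hadd : PySem.Set.add seen x = seen := by
        simp [PySem.Set.add]; simpa [PySem.Set.contains] using h
      rw [hadd, ih]
    · rw [if_neg h]
      have hadd : PySem.Set.add seen x = seen ++ [x] := by
        simp [PySem.Set.add]; simpa [PySem.Set.contains] using h
      rw [ih, hadd]
      simp

theorem pv_dedup_eq_dd (xs : List String) :
    PySem.List.dedup xs = pvDD PySem.Set.empty xs := by
  rw [PySem.List.dedup_eq_ofList, PySem.Set.ofList_eq_foldl, pv_foldl_add]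
  rfl

theorem pv_bloop_eq_g (l : List String) (seen : PySem.Set String) (row : List String)
    (rows : List (List String)) : pvBLoop l seen row rows = pvG (pvDD seen l) row rows := by
  induction l generalizing seen row rows with
  | nil => simp [pvBLoop, pvDD, pvG]
  | cons x xs ih =>
    simp only [pvBLoop, pvDD]
    by_cases h : PySem.Set.contains seen x
    · rw [if_pos h, if_pos h, ih]
    · rw [if_neg h, if_neg h]
      simp only [pvG]
      by_cases h5 : (row ++ [x]).length = 5
      · rw [if_pos h5, if_pos h5]
        by_cases h55 : (rows ++ [row ++ [x]]).length = 5
        · rw [if_pos h55, if_pos h55]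
        · rw [if_neg h55, if_neg h55, ih]
      · rw [if_neg h5, if_neg h5, ih]

theorem pv_rowfill (k : Nat) (d row : List String) (rows : List (List String))
    (hk : 1 ≤ k) (hrow : row.length + k = 5) (hd : k ≤ d.length) :
    pvG d row rows = if rows.length + 1 = 5 then rows ++ [row ++ d.take k]
      else pvG (d.drop k) [] (rows ++ [row ++ d.take k]) := by
  induction k generalizing d row with
  | zero => omega
  | succ k ih =>
    match d with
    | [] => simp at hd
    | x :: xs =>
      simp only [pvG]
      by_cases hk0 : k = 0
      · subst hk0
        have h5 : (row ++ [x]).length = 5 := by simp; omega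
        rw [if_pos h5]
        have h55 : (rows ++ [row ++ [x]]).length = 5 ↔ rows.length + 1 = 5 := by simp
        by_cases hb : rows.length + 1 = 5
        · rw [if_pos (h55.mpr hb), if_pos hb]
          simp
        · rw [if_neg (fun hh => hb (h55.mp hh)), if_neg hb]
          simp
      · have h5 : ¬ (row ++ [x]).length = 5 := by simp; omega
        rw [if_neg h5]
        rw [ih xs (row ++ [x]) (by omega) (by simp; omega) (by simpa using hd)]
        simp [List.append_assoc]

theorem pv_g25 (d : List String) (hd : 25 ≤ d.length) :
    pvG d [] [] = [d.take 5, (d.drop 5).take 5, (d.drop 10).take 5, (d.drop 15).take 5,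
      (d.drop 20).take 5] := by
  rw [pv_rowfill 5 d [] [] (by omega) (by simp) (by omega)]
  rw [if_neg (by simp)]
  rw [pv_rowfill 5 (d.drop 5) [] _ (by omega) (by simp) (by simp; omega)]
  rw [if_neg (by simp)]
  rw [pv_rowfill 5 ((d.drop 5).drop 5) [] _ (by omega) (by simp) (by simp; omega)]
  rw [if_neg (by simp)]
  rw [pv_rowfill 5 (((d.drop 5).drop 5).drop 5) [] _ (by omega) (by simp) (by simp; omega)]
  rw [if_neg (by simp)]
  rw [pv_rowfill 5 ((((d.drop 5).drop 5).drop 5).drop 5) [] _ (by omega) (by simp) (by simp; omega)]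
  rw [if_pos (by simp)]
  simp [List.drop_drop]

theorem pv_dedup_length (pre : List String) :
    25 ≤ (PySem.List.dedup (pre ++ pvAlpha)).length := by
  have hsub : pvAlpha ⊆ PySem.List.dedup (pre ++ pvAlpha) := by
    intro x hx
    rw [PySem.List.mem_dedup]
    exact List.mem_append_right pre hx
  have h3 : pvAlpha.toFinset ⊆ (PySem.List.dedup (pre ++ pvAlpha)).toFinset := by
    intro x hx; simp only [List.mem_toFinset] at hx ⊢; exact hsub hx
  have hc := Finset.card_le_card h3
  have h1 : pvAlpha.toFinset.card = 25 := by decide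
  have h2 := List.toFinset_card_le (PySem.List.dedup (pre ++ pvAlpha))
  omega

theorem pv_slices (eng : List String) :
    (PySem.List.pyRange 0 5 1).foldl
      (fun acc i => acc ++ [PySem.List.slice eng (some (i * 5)) (some (i * 5 + 5))]) []
    = [eng.take 5, (eng.drop 5).take 5, (eng.drop 10).take 5, (eng.drop 15).take 5,
       (eng.drop 20).take 5] := by
  have hr : PySem.List.pyRange 0 5 1 = [0, 1, 2, 3, 4] := by decide
  rw [hr]
  simp only [List.foldl_cons, List.foldl_nil]
  rw [PySem.List.slice_toNat eng (by norm_num) (by norm_num),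
      PySem.List.slice_toNat eng (by norm_num) (by norm_num),
      PySem.List.slice_toNat eng (by norm_num) (by norm_num),
      PySem.List.slice_toNat eng (by norm_num) (by norm_num),
      PySem.List.slice_toNat eng (by norm_num) (by norm_num)]
  have t5 : (5 : Int).toNat = 5 := rfl
  have t10 : (10 : Int).toNat = 10 := rfl
  have t15 : (15 : Int).toNat = 15 := rfl
  have t20 : (20 : Int).toNat = 20 := rfl
  have t25 : (25 : Int).toNat = 25 := rfl
  simp [t5, t10, t15, t20, t25]

-- ===== VERDICT (by name: the statement is the Claim_ definition above) =====
theorem handle_new_alphabet_spec : Claim_equal_handle_new_alphabet := by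
  intro password _
  simp only [Spec_handle_new_alphabet, handle_new_alphabet, handle_new_alphabet_alt]
  have hfold := pv_insert_loop password.toList [] pvAlpha
  simp only [List.length_nil, Nat.cast_zero, List.nil_append] at hfold
  rw [hfold]
  rw [pv_slices, pv_bloop_eq_g, ← pv_dedup_eq_dd]
  rw [pv_g25 _ (pv_dedup_length _)]
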